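-- pv_equiv track=rewrite | github.com/Nattapong-top/Learning-Python | Python101_Pythonic/00-Dev-Mindset/phase1_core_logic/count_digit.py | count_digit_production
-- ===== SOURCE A (Python) =====
-- def count_digit_production(raw_list:list, d:int):
--     if not isinstance(d, int) or not (0 <= d <=9):
--         raise ValueError('d ไม่ใช่ตัวเลขจำนวนเต็มหรือไม่ได้อยู่ระหว่าง 0 - 9')
--
--     count = 0
--
--     for n in raw_list:
--         if not isinstance(n, int):
--             continue
--
--         num = abs(n)
--
--         # วิธีรับมือกับ d = 0 เนื่องจาก while จะไม่ทำงาน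
--         # จึงต้องแยก 0 มานับนอก while
--         if num == 0:
--             if d == 0:
--                 count += 1
--
--         while num > 0:
--             digit = num % 10
--             if digit == d:
--                 count += 1
--             num //= 10
--     return count
-- ===== SOURCE B (Python) =====
-- def count_digit_production(raw_list: list, d: int):
--     if not isinstance(d, int) or not (0 <= d <= 9):
--         raise ValueError('d \u0e44\u0e21\u0e48\u0e43\u0e0a\u0e48\u0e15\u0e31\u0e27\u0e40\u0e25\u0e02\u0e08\u0e33\u0e19\u0e27\u0e19\u0e40\u0e15\u0e47\u0e21\u0e2b\u0e23\u0e37\u0e2d\u0e44\u0e21\u0e48\u0e44\u0e14\u0e49\u0e2d\u0e22\u0e39\u0e48\u0e23\u0e30\u0e2b\u0e27\u0e48\u0e32\u0e07 0 - 9')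
--     ch = str(int(d))
--     return sum(str(abs(n)).count(ch) for n in raw_list if isinstance(n, int))
-- ===== Notes on version B (the rewrite author's own statement) =====
-- stated objective: simpler
-- what changed: Replaces the arithmetic mod/div digit-extraction loop with the explicit num==0 special case by a single sum over str(abs(n)).count(str(int(d))), counting the digit character in the decimal string of each element.
import Mathlib
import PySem

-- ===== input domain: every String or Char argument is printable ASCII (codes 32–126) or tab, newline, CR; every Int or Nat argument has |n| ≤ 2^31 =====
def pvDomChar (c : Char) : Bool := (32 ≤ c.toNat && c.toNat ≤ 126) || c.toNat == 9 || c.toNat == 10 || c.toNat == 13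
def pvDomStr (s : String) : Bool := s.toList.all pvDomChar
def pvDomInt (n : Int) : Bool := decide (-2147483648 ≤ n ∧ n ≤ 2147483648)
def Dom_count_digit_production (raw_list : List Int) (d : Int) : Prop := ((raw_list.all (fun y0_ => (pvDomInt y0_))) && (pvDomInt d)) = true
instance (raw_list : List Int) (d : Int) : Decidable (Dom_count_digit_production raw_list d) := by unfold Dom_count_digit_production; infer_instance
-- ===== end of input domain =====

-- B replaces A's mod/div digit-extraction loop (with its num==0 special case) by summing
-- str(abs(n)).count(str(int(d))) over the list; objective: simpler.

-- ===== PORT A =====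
-- A's inner 'while num > 0' loop, carried over its state (num, count)
def pvLoopA (d : Int) (num : Int) (count : Int) : Int :=
  if 0 < num then
    pvLoopA d (PySem.Int.floordiv num 10)
      (if PySem.Int.mod num 10 = d then count + 1 else count)
  else count
termination_by num.toNat
decreasing_by
  rename_i h
  rw [PySem.Int.floordiv_eq_ediv_of_pos (by omega)]
  omega

def count_digit_production (raw_list : List Int) (d : Int) : Int :=
  raw_list.foldl (fun count n =>
    let num := |n|
    pvLoopA d num (if num = 0 then (if d = 0 then count + 1 else count) else count)) 0

-- ===== PORT B =====
def count_digit_production_alt (raw_list : List Int) (d : Int) : Int :=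
  let ch := PySem.Int.toStr d
  (raw_list.map (fun n => (PySem.Str.count (PySem.Int.toStr |n|) ch : Int))).sum

-- ===== PRECONDITION & SPEC =====
-- A raises ValueError unless 0 <= d <= 9 (B has the identical guard)
def Pre_count_digit_production (raw_list : List Int) (d : Int) : Prop := 0 ≤ d ∧ d ≤ 9
instance (raw_list : List Int) (d : Int) : Decidable (Pre_count_digit_production raw_list d) := by
  unfold Pre_count_digit_production; infer_instance

def pvWitness_count_digit_production : List Int × Int := ([0, -10, 123], 1)

def Spec_count_digit_production (raw_list : List Int) (d : Int) (out : Int) : Prop := out = count_digit_production_alt raw_list d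
instance (raw_list : List Int) (d : Int) (out : Int) : Decidable (Spec_count_digit_production raw_list d out) := by unfold Spec_count_digit_production; infer_instance

-- ===== CLAIM (what is proved, stated in full; the proofs are below) =====
def Claim_equal_count_digit_production : Prop := ∀ (raw_list : List Int) (d : Int), Dom_count_digit_production raw_list d → Pre_count_digit_production raw_list d → Spec_count_digit_production raw_list d (count_digit_production raw_list d)

-- ===== LEMMAS AND PROOFS =====

-- single-character substring count is character count
theorem pvCount_go_single (c : Char) :
    ∀ (l : List Char) (fuel acc : Nat), l.length ≤ fuel →
      PySem.Chars.count.go [c] fuel l acc = acc + l.count c := by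
  intro l
  induction l with
  | nil =>
    intro fuel acc _
    cases fuel <;> simp [PySem.Chars.count.go]
  | cons h t ih =>
    intro fuel acc hle
    cases fuel with
    | zero => simp at hle
    | succ f =>
      have hlt : t.length ≤ f := by simpa using hle
      have heq : PySem.Chars.count.go [c] (f + 1) (h :: t) acc
          = if ([c] : List Char).isPrefixOf (h :: t)
            then PySem.Chars.count.go [c] f t (acc + 1)
            else PySem.Chars.count.go [c] f t acc := rfl
      rw [heq]
      by_cases hc : c = h
      · have hp : ([c] : List Char).isPrefixOf (h :: t) = true := by
          simp [List.isPrefixOf, hc]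
        rw [hp, if_pos rfl, ih f (acc + 1) hlt]
        have : (h :: t).count c = t.count c + 1 := by
          simp [List.count_cons, hc]
        rw [this]; omega
      · have hp : ([c] : List Char).isPrefixOf (h :: t) = false := by
          simp [List.isPrefixOf]
          exact fun hh => hc hh
        rw [hp]
        simp only [Bool.false_eq_true, if_false]
        rw [ih f acc hlt]
        have : (h :: t).count c = t.count c := by
          simp [List.count_cons]
          intro hh; exact absurd hh.symm hc
        rw [this]

theorem pvCount_single (s : List Char) (c : Char) :
    PySem.Chars.count s [c] = s.count c := by
  simp [PySem.Chars.count]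
  rw [pvCount_go_single c s s.length 0 le_rfl]
  omega

-- toDigitsCore: the accumulator is appended
theorem pvTdc_acc : ∀ (f n : Nat) (acc : List Char),
    Nat.toDigitsCore 10 f n acc = Nat.toDigitsCore 10 f n [] ++ acc := by
  intro f
  induction f with
  | zero => intro n acc; simp [Nat.toDigitsCore]
  | succ f ih =>
    intro n acc
    simp only [Nat.toDigitsCore]
    by_cases h : n / 10 = 0
    · simp [h]
    · simp only [h, if_false]
      rw [ih (n / 10) (Nat.digitChar (n % 10) :: acc),
          ih (n / 10) [Nat.digitChar (n % 10)]]
      simp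

-- toDigitsCore: the fuel does not matter once it exceeds n
theorem pvTdc_fuel : ∀ (f f' n : Nat), n < f → n < f' →
    Nat.toDigitsCore 10 f n [] = Nat.toDigitsCore 10 f' n [] := by
  intro f
  induction f with
  | zero => intro f' n h; omega
  | succ f ih =>
    intro f' n hf hf'
    cases f' with
    | zero => omega
    | succ f'' =>
      simp only [Nat.toDigitsCore]
      by_cases h : n / 10 = 0
      · simp [h]
      · simp only [h, if_false]
        have hn : 0 < n := by omega
        have hd : n / 10 < n := Nat.div_lt_self hn (by omega)
        rw [pvTdc_acc f (n / 10) [Nat.digitChar (n % 10)],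
            pvTdc_acc f'' (n / 10) [Nat.digitChar (n % 10)],
            ih f'' (n / 10) (by omega) (by omega)]

-- one unfolding of str(m) for a natural m
theorem pvToDigits_step (n : Nat) :
    Nat.toDigits 10 n =
      (if 10 ≤ n then Nat.toDigits 10 (n / 10) else []) ++ [Nat.digitChar (n % 10)] := by
  show Nat.toDigitsCore 10 (n + 1) n [] = _
  simp only [Nat.toDigitsCore]
  by_cases h : n / 10 = 0
  · have : ¬ 10 ≤ n := by omega
    simp [h, this]
  · have h10 : 10 ≤ n := by omega
    simp only [h, if_false, h10, if_true]
    rw [pvTdc_acc n (n / 10) [Nat.digitChar (n % 10)]]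
    have : Nat.toDigits 10 (n / 10) = Nat.toDigitsCore 10 (n / 10 + 1) (n / 10) [] := rfl
    rw [this, pvTdc_fuel n (n / 10 + 1) (n / 10) (by omega) (by omega)]

theorem pvDigitChar_inj (a b : Nat) (ha : a < 10) (hb : b < 10) :
    (Nat.digitChar a = Nat.digitChar b) ↔ a = b := by
  interval_cases a <;> interval_cases b <;> decide

-- A's while loop counts exactly the occurrences of the digit character in str(m)
theorem pvLoopA_eq (d : Int) (hd0 : 0 ≤ d) (hd9 : d ≤ 9) :
    ∀ (m : Nat), 0 < m → ∀ (count : Int),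
      pvLoopA d (m : Int) count
        = count + ((Nat.toDigits 10 m).count (Nat.digitChar d.toNat) : Int) := by
  intro m
  induction m using Nat.strong_induction_on with
  | _ m ih =>
    intro hm count
    rw [pvLoopA]
    have hpos : (0 : Int) < (m : Int) := by exact_mod_cast hm
    simp only [hpos, if_true]
    have hfd : PySem.Int.floordiv (m : Int) 10 = ((m / 10 : Nat) : Int) := by
      rw [PySem.Int.floordiv_eq_ediv_of_pos (by omega)]; omega
    have hmd : PySem.Int.mod (m : Int) 10 = ((m % 10 : Nat) : Int) := by
      rw [PySem.Int.mod_eq_emod_of_pos (by omega)]; omega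
    have hcond : (PySem.Int.mod (m : Int) 10 = d) ↔ (m % 10 = d.toNat) := by
      rw [hmd]; omega
    have hif : (if PySem.Int.mod (m : Int) 10 = d then count + 1 else count)
        = count + (([Nat.digitChar (m % 10)].count (Nat.digitChar d.toNat) : Nat) : Int) := by
      by_cases hcm : PySem.Int.mod (m : Int) 10 = d
      · have h := hcond.mp hcm
        rw [if_pos hcm, ← h]
        simp [List.count_cons]
      · have h : ¬ m % 10 = d.toNat := fun hh => hcm (hcond.mpr hh)
        have hne : ¬ Nat.digitChar d.toNat = Nat.digitChar (m % 10) := fun hcc =>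
          h ((pvDigitChar_inj d.toNat (m % 10) (by omega) (by omega)).mp hcc).symm
        rw [if_neg hcm]
        simp [List.count_cons]
        exact fun hcc => hne hcc.symm
    rw [hfd, hif]
    by_cases h10 : 10 ≤ m
    · have hdiv : 0 < m / 10 := by omega
      rw [ih (m / 10) (Nat.div_lt_self hm (by omega)) hdiv]
      rw [pvToDigits_step m]
      simp only [h10, if_true, List.count_append]
      push_cast
      ring
    · have hz : m / 10 = 0 := by omega
      rw [hz]
      rw [pvLoopA]
      simp only [Nat.cast_zero, lt_irrefl, if_false]
      rw [pvToDigits_step m]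
      simp only [h10, if_false, List.nil_append]

-- str(d) for 0 ≤ d ≤ 9 is the single digit character
theorem pvToChars_digit (d : Int) (hd0 : 0 ≤ d) (hd9 : d ≤ 9) :
    PySem.Int.toChars d = [Nat.digitChar d.toNat] := by
  interval_cases d <;> decide

-- per-element agreement of the two fold bodies
theorem pvElem_eq (d : Int) (hd0 : 0 ≤ d) (hd9 : d ≤ 9) (n count : Int) :
    pvLoopA d |n| (if |n| = 0 then (if d = 0 then count + 1 else count) else count)
      = count + (PySem.Str.count (PySem.Int.toStr |n|) (PySem.Int.toStr d) : Int) := by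
  have habs : |n| = ((n.natAbs : Nat) : Int) := by
    rw [Int.abs_eq_natAbs]
  have hB : (PySem.Str.count (PySem.Int.toStr |n|) (PySem.Int.toStr d) : Int)
      = ((Nat.toDigits 10 n.natAbs).count (Nat.digitChar d.toNat) : Int) := by
    have h1 : (PySem.Int.toStr |n|).toList = Nat.toDigits 10 n.natAbs := by
      rw [PySem.Int.toList_toStr, habs]
      simp [PySem.Int.toChars, Int.natCast_nonneg, Int.toNat_natCast]
      rw [if_neg (not_lt.mpr (abs_nonneg n)), habs, Int.toNat_natCast]
    have h2 : (PySem.Int.toStr d).toList = [Nat.digitChar d.toNat] := by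
      rw [PySem.Int.toList_toStr, pvToChars_digit d hd0 hd9]
    rw [PySem.Str.count, h1, h2, pvCount_single]
  rw [hB, habs]
  by_cases hz : n.natAbs = 0
  · rw [hz]
    simp only [Nat.cast_zero, if_pos rfl]
    rw [pvLoopA]
    simp only [lt_irrefl, if_false]
    have h0 : Nat.toDigits 10 0 = ['0'] := by decide
    rw [h0]
    by_cases hd : d = 0
    · subst hd
      have hc1 : List.count (Nat.digitChar (Int.toNat 0)) ['0'] = 1 := by decide
      rw [if_pos rfl, hc1]
      norm_num
    · have hd' : ¬ d.toNat = 0 := by omega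
      have hne : ¬ Nat.digitChar d.toNat = Nat.digitChar 0 := fun hcc =>
        hd' ((pvDigitChar_inj d.toNat 0 (by omega) (by omega)).mp hcc)
      have hch : ¬ Nat.digitChar d.toNat = '0' := by
        have h00 : Nat.digitChar 0 = '0' := by decide
        rw [← h00]; exact hne
      have hc0 : List.count (Nat.digitChar d.toNat) ['0'] = 0 := by
        simp [List.count_cons]
        exact fun hcc => hch hcc.symm
      rw [if_neg hd, hc0]
      norm_num
  · have hpos : 0 < n.natAbs := Nat.pos_of_ne_zero hz
    have hnz : ¬ ((n.natAbs : Int) = 0) := by exact_mod_cast hz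
    rw [if_neg hnz]
    exact pvLoopA_eq d hd0 hd9 n.natAbs hpos count

theorem pvFold_eq (d : Int) (hd0 : 0 ≤ d) (hd9 : d ≤ 9) :
    ∀ (l : List Int) (acc : Int),
      l.foldl (fun count n =>
        let num := |n|
        pvLoopA d num (if num = 0 then (if d = 0 then count + 1 else count) else count)) acc
      = acc + (l.map (fun n => (PySem.Str.count (PySem.Int.toStr |n|) (PySem.Int.toStr d) : Int))).sum := by
  intro l
  induction l with
  | nil => intro acc; simp
  | cons x xs ih =>
    intro acc
    simp only [List.foldl_cons, List.map_cons, List.sum_cons]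
    rw [ih, pvElem_eq d hd0 hd9 x acc]
    ring

-- ===== VERDICT (by name: the statement is the Claim_ definition above) =====
theorem count_digit_production_spec : Claim_equal_count_digit_production := by
  intro raw_list d _ hpre
  unfold Spec_count_digit_production count_digit_production count_digit_production_alt
  rw [pvFold_eq d hpre.1 hpre.2 raw_list 0]
  simp
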